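-- pv_equiv track=rewrite | github.com/xian-technology/xian-contracting | src/contracting/execution/tracer.py | _opcode_cost
-- ===== SOURCE A (Python) =====
-- DEFAULT_COST = 4
--
-- _EXACT_OPCODE_COSTS = {
--     "CACHE": 2,
--     "POP_TOP": 2,
--     "PUSH_NULL": 2,
--     "NOP": 2,
--     "LOAD_ASSERTION_ERROR": 2,
--     "LOAD_COMMON_CONSTANT": 2,
--     "LOAD_CONST": 2,
--     "LOAD_FAST": 2,
--     "LOAD_FAST_AND_CLEAR": 2,
--     "LOAD_FAST_BORROW": 2,
--     "LOAD_FAST_BORROW_LOAD_FAST_BORROW": 2,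
--     "LOAD_FAST_CHECK": 2,
--     "LOAD_FAST_LOAD_FAST": 2,
--     "LOAD_SMALL_INT": 2,
--     "RESUME": 2,
--     "RETURN_VALUE": 2,
--     "STORE_FAST": 2,
--     "STORE_FAST_LOAD_FAST": 2,
--     "STORE_FAST_MAYBE_NULL": 2,
--     "STORE_FAST_STORE_FAST": 2,
--     "BUILD_INTERPOLATION": 8,
--     "BUILD_LIST": 8,
--     "BUILD_MAP": 38,
--     "BUILD_SET": 8,
--     "BUILD_SLICE": 12,
--     "BUILD_STRING": 6,
--     "BUILD_TEMPLATE": 38,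
--     "BUILD_TUPLE": 8,
--     "CALL": 1610,
--     "CALL_FUNCTION_EX": 1000,
--     "CALL_INTRINSIC_1": 126,
--     "CALL_INTRINSIC_2": 126,
--     "CALL_KW": 1000,
--     "COMPARE_OP": 6,
--     "FOR_ITER": 6,
--     "FORMAT_VALUE": 6,
--     "GET_ITER": 2,
--     "GET_LEN": 2,
--     "IMPORT_FROM": 38,
--     "IMPORT_NAME": 126,
--     "IMPORT_STAR": 126,
--     "LIST_APPEND": 6,
--     "LIST_EXTEND": 8,
--     "LOAD_ATTR": 6,
--     "LOAD_BUILD_CLASS": 1610,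
--     "LOAD_CLOSURE": 2,
--     "LOAD_DEREF": 4,
--     "LOAD_FROM_DICT_OR_DEREF": 4,
--     "LOAD_FROM_DICT_OR_GLOBALS": 4,
--     "LOAD_GLOBAL": 4,
--     "LOAD_LOCALS": 2,
--     "LOAD_NAME": 4,
--     "LOAD_SPECIAL": 6,
--     "LOAD_SUPER_ATTR": 6,
--     "MAKE_FUNCTION": 12,
--     "MAP_ADD": 6,
--     "POP_JUMP_IF_FALSE": 6,
--     "POP_JUMP_IF_NONE": 6,
--     "POP_JUMP_IF_NOT_NONE": 6,
--     "POP_JUMP_IF_TRUE": 6,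
--     "RAISE_VARARGS": 126,
--     "SETUP_ANNOTATIONS": 1000,
--     "SET_ADD": 6,
-- }
--
-- _PREFIX_OPCODE_COSTS = (
--     ("INSTRUMENTED_", None),
--     ("BINARY_", 6),
--     ("DELETE_", 4),
--     ("JUMP_", 6),
--     ("LOAD_", 4),
--     ("POP_JUMP", 6),
--     ("STORE_", 4),
--     ("UNARY_", 4),
-- )
--
-- def _opcode_cost(opname: str) -> int:
--     if not opname or opname.startswith("<"):
--         return DEFAULT_COST
--
--     exact_cost = _EXACT_OPCODE_COSTS.get(opname)
--     if exact_cost is not None: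
--         return exact_cost
--
--     for prefix, cost in _PREFIX_OPCODE_COSTS:
--         if opname.startswith(prefix):
--             if prefix == "INSTRUMENTED_":
--                 return _opcode_cost(opname.removeprefix(prefix))
--             return cost
--
--     return DEFAULT_COST
-- ===== SOURCE B (Python) =====
-- DEFAULT_COST = 4
--
-- # Exact opcodes grouped by cost class instead of a name->cost mapping.
-- _COST_CLASSES = (
--     (2, frozenset({
--         "CACHE", "POP_TOP", "PUSH_NULL", "NOP", "LOAD_ASSERTION_ERROR",
--         "LOAD_COMMON_CONSTANT", "LOAD_CONST", "LOAD_FAST",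
--         "LOAD_FAST_AND_CLEAR", "LOAD_FAST_BORROW",
--         "LOAD_FAST_BORROW_LOAD_FAST_BORROW", "LOAD_FAST_CHECK",
--         "LOAD_FAST_LOAD_FAST", "LOAD_SMALL_INT", "RESUME", "RETURN_VALUE",
--         "STORE_FAST", "STORE_FAST_LOAD_FAST", "STORE_FAST_MAYBE_NULL",
--         "STORE_FAST_STORE_FAST", "GET_ITER", "GET_LEN", "LOAD_CLOSURE",
--         "LOAD_LOCALS"})),
--     (8, frozenset({"BUILD_INTERPOLATION", "BUILD_LIST", "BUILD_SET",
--                    "BUILD_TUPLE", "LIST_EXTEND"})),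
--     (38, frozenset({"BUILD_MAP", "BUILD_TEMPLATE", "IMPORT_FROM"})),
--     (12, frozenset({"BUILD_SLICE", "MAKE_FUNCTION"})),
--     (6, frozenset({"BUILD_STRING", "COMPARE_OP", "FOR_ITER", "FORMAT_VALUE",
--                    "LIST_APPEND", "LOAD_ATTR", "LOAD_SPECIAL",
--                    "LOAD_SUPER_ATTR", "MAP_ADD", "POP_JUMP_IF_FALSE",
--                    "POP_JUMP_IF_NONE", "POP_JUMP_IF_NOT_NONE",
--                    "POP_JUMP_IF_TRUE", "SET_ADD"})),
--     (1610, frozenset({"CALL", "LOAD_BUILD_CLASS"})),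
--     (1000, frozenset({"CALL_FUNCTION_EX", "CALL_KW", "SETUP_ANNOTATIONS"})),
--     (126, frozenset({"CALL_INTRINSIC_1", "CALL_INTRINSIC_2", "IMPORT_NAME",
--                      "IMPORT_STAR", "RAISE_VARARGS"})),
--     (4, frozenset({"LOAD_DEREF", "LOAD_FROM_DICT_OR_DEREF",
--                    "LOAD_FROM_DICT_OR_GLOBALS", "LOAD_GLOBAL", "LOAD_NAME"})),
-- )
--
-- # The cost-bearing prefixes all begin with distinct letters, so a single
-- # dictionary dispatch on the first character replaces the prefix scan.
-- _PREFIX_BY_INITIAL = {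
--     "B": ("BINARY_", 6),
--     "D": ("DELETE_", 4),
--     "J": ("JUMP_", 6),
--     "L": ("LOAD_", 4),
--     "P": ("POP_JUMP", 6),
--     "S": ("STORE_", 4),
--     "U": ("UNARY_", 4),
-- }
--
--
-- def _opcode_cost(opname: str) -> int:
--     # Peel every leading INSTRUMENTED_ prefix iteratively.
--     while opname.startswith("INSTRUMENTED_"):
--         opname = opname[len("INSTRUMENTED_"):]
--
--     if not opname or opname[0] == "<":
--         return DEFAULT_COST
--
--     for cost, names in _COST_CLASSES:
--         if opname in names:
--             return cost
--
--     entry = _PREFIX_BY_INITIAL.get(opname[0])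
--     if entry is not None and opname.startswith(entry[0]):
--         return entry[1]
--
--     return DEFAULT_COST
-- ===== Notes on version B (the rewrite author's own statement) =====
-- stated objective: alternative
-- what changed: Replaces the name->cost dict plus sentinel-bearing prefix table with recursion by (1) an iterative loop peeling leading INSTRUMENTED_ prefixes, (2) an exact table reorganised as cost classes searched by set membership, and (3) a single first-character dictionary dispatch replacing the linear prefix scan (all prefixes start with distinct letters).
import Mathlib
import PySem

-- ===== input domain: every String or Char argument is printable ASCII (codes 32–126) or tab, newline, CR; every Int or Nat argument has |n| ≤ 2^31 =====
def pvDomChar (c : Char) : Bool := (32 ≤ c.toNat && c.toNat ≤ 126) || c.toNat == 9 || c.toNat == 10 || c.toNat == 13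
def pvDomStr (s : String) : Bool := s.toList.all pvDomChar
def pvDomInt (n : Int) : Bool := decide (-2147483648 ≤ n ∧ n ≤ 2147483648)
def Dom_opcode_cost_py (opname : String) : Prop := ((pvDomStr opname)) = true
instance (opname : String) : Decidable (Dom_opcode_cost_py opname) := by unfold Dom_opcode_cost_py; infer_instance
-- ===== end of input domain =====

set_option maxRecDepth 16000

-- B peels leading INSTRUMENTED_ prefixes iteratively, searches the exact table reorganised as
-- cost classes by set membership, and replaces the linear prefix scan by a first-character
-- dictionary dispatch — an alternative decomposition, same cost.


-- ===== PORT A =====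
def pvDefaultCost : Int := 4

def pvExactCosts : PySem.Dict String Int := PySem.Dict.ofList [
  ("CACHE", 2),
  ("POP_TOP", 2),
  ("PUSH_NULL", 2),
  ("NOP", 2),
  ("LOAD_ASSERTION_ERROR", 2),
  ("LOAD_COMMON_CONSTANT", 2),
  ("LOAD_CONST", 2),
  ("LOAD_FAST", 2),
  ("LOAD_FAST_AND_CLEAR", 2),
  ("LOAD_FAST_BORROW", 2),
  ("LOAD_FAST_BORROW_LOAD_FAST_BORROW", 2),
  ("LOAD_FAST_CHECK", 2),
  ("LOAD_FAST_LOAD_FAST", 2),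
  ("LOAD_SMALL_INT", 2),
  ("RESUME", 2),
  ("RETURN_VALUE", 2),
  ("STORE_FAST", 2),
  ("STORE_FAST_LOAD_FAST", 2),
  ("STORE_FAST_MAYBE_NULL", 2),
  ("STORE_FAST_STORE_FAST", 2),
  ("BUILD_INTERPOLATION", 8),
  ("BUILD_LIST", 8),
  ("BUILD_MAP", 38),
  ("BUILD_SET", 8),
  ("BUILD_SLICE", 12),
  ("BUILD_STRING", 6),
  ("BUILD_TEMPLATE", 38),
  ("BUILD_TUPLE", 8),
  ("CALL", 1610),
  ("CALL_FUNCTION_EX", 1000),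
  ("CALL_INTRINSIC_1", 126),
  ("CALL_INTRINSIC_2", 126),
  ("CALL_KW", 1000),
  ("COMPARE_OP", 6),
  ("FOR_ITER", 6),
  ("FORMAT_VALUE", 6),
  ("GET_ITER", 2),
  ("GET_LEN", 2),
  ("IMPORT_FROM", 38),
  ("IMPORT_NAME", 126),
  ("IMPORT_STAR", 126),
  ("LIST_APPEND", 6),
  ("LIST_EXTEND", 8),
  ("LOAD_ATTR", 6),
  ("LOAD_BUILD_CLASS", 1610),
  ("LOAD_CLOSURE", 2),
  ("LOAD_DEREF", 4),
  ("LOAD_FROM_DICT_OR_DEREF", 4),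
  ("LOAD_FROM_DICT_OR_GLOBALS", 4),
  ("LOAD_GLOBAL", 4),
  ("LOAD_LOCALS", 2),
  ("LOAD_NAME", 4),
  ("LOAD_SPECIAL", 6),
  ("LOAD_SUPER_ATTR", 6),
  ("MAKE_FUNCTION", 12),
  ("MAP_ADD", 6),
  ("POP_JUMP_IF_FALSE", 6),
  ("POP_JUMP_IF_NONE", 6),
  ("POP_JUMP_IF_NOT_NONE", 6),
  ("POP_JUMP_IF_TRUE", 6),
  ("RAISE_VARARGS", 126),
  ("SETUP_ANNOTATIONS", 1000),
  ("SET_ADD", 6)]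

-- A's table: cost None (= none) marks the INSTRUMENTED_ entry, as in the Python.
def pvPrefixCosts : List (String × Option Int) := [
  ("INSTRUMENTED_", none), ("BINARY_", some 6), ("DELETE_", some 4),
  ("JUMP_", some 6), ("LOAD_", some 4), ("POP_JUMP", some 6),
  ("STORE_", some 4), ("UNARY_", some 4)]

-- opname.removeprefix(p) when p is known to be a prefix: drop |p| chars.
def pvRemovePrefix (opname p : String) : String :=
  String.ofList (opname.toList.drop p.toList.length)

-- the for-loop with early return = first table entry whose prefix matches
def opcode_cost_py (opname : String) : Int :=
  if opname = "" || PySem.Str.startswith opname "<" then pvDefaultCost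
  else
    match pvExactCosts.get? opname with
    | some exact_cost => exact_cost
    | none =>
      match h : pvPrefixCosts.find? (fun pc => PySem.Str.startswith opname pc.1) with
      | some pc =>
        if hp : pc.1 = "INSTRUMENTED_" then
          opcode_cost_py (pvRemovePrefix opname pc.1)
        else pc.2.getD pvDefaultCost  -- getD unreachable default: only INSTRUMENTED_ carries none
      | none => pvDefaultCost
termination_by opname.toList.length
decreasing_by
  have hpred := List.find?_some h
  simp only [hp, PySem.Str.startswith_eq] at hpred
  have hpre := (PySem.Chars.startswith_iff _ _).mp hpred
  have hlen := hpre.length_le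
  simp only [pvRemovePrefix, hp] at *
  simp only [String.toList_ofList, List.length_drop]
  simp at hlen ⊢
  omega

-- ===== PORT B =====
-- while opname.startswith("INSTRUMENTED_"): opname = opname[13:]
def pvStripInstrumented (cs : List Char) : List Char :=
  if PySem.Chars.startswith cs "INSTRUMENTED_".toList then
    pvStripInstrumented (cs.drop "INSTRUMENTED_".toList.length)
  else cs
termination_by cs.length
decreasing_by
  have hpre := (PySem.Chars.startswith_iff _ _).mp (by assumption)
  have hlen := hpre.length_le
  simp at hlen ⊢
  omega

-- exact opcodes grouped by cost class (searched by membership)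
def pvCostClasses : List (Int × List String) := [
  (2, ["CACHE", "POP_TOP", "PUSH_NULL", "NOP", "LOAD_ASSERTION_ERROR", "LOAD_COMMON_CONSTANT", "LOAD_CONST", "LOAD_FAST", "LOAD_FAST_AND_CLEAR", "LOAD_FAST_BORROW", "LOAD_FAST_BORROW_LOAD_FAST_BORROW", "LOAD_FAST_CHECK", "LOAD_FAST_LOAD_FAST", "LOAD_SMALL_INT", "RESUME", "RETURN_VALUE", "STORE_FAST", "STORE_FAST_LOAD_FAST", "STORE_FAST_MAYBE_NULL", "STORE_FAST_STORE_FAST", "GET_ITER", "GET_LEN", "LOAD_CLOSURE", "LOAD_LOCALS"]),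
  (8, ["BUILD_INTERPOLATION", "BUILD_LIST", "BUILD_SET", "BUILD_TUPLE", "LIST_EXTEND"]),
  (38, ["BUILD_MAP", "BUILD_TEMPLATE", "IMPORT_FROM"]),
  (12, ["BUILD_SLICE", "MAKE_FUNCTION"]),
  (6, ["BUILD_STRING", "COMPARE_OP", "FOR_ITER", "FORMAT_VALUE", "LIST_APPEND", "LOAD_ATTR", "LOAD_SPECIAL", "LOAD_SUPER_ATTR", "MAP_ADD", "POP_JUMP_IF_FALSE", "POP_JUMP_IF_NONE", "POP_JUMP_IF_NOT_NONE", "POP_JUMP_IF_TRUE", "SET_ADD"]),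
  (1610, ["CALL", "LOAD_BUILD_CLASS"]),
  (1000, ["CALL_FUNCTION_EX", "CALL_KW", "SETUP_ANNOTATIONS"]),
  (126, ["CALL_INTRINSIC_1", "CALL_INTRINSIC_2", "IMPORT_NAME", "IMPORT_STAR", "RAISE_VARARGS"]),
  (4, ["LOAD_DEREF", "LOAD_FROM_DICT_OR_DEREF", "LOAD_FROM_DICT_OR_GLOBALS", "LOAD_GLOBAL", "LOAD_NAME"])]

-- the cost-bearing prefixes all start with distinct letters: dispatch on the first character
def pvPrefixByInitial : PySem.Dict Char (String × Int) := PySem.Dict.ofList [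
  ('B', ("BINARY_", 6)), ('D', ("DELETE_", 4)), ('J', ("JUMP_", 6)),
  ('L', ("LOAD_", 4)), ('P', ("POP_JUMP", 6)), ('S', ("STORE_", 4)),
  ('U', ("UNARY_", 4))]

def opcode_cost_py_alt (opname : String) : Int :=
  match pvStripInstrumented opname.toList with
  | [] => pvDefaultCost
  | c :: rest =>
    if c = '<' then pvDefaultCost
    else
      match pvCostClasses.find? (fun b => b.2.contains (String.ofList (c :: rest))) with
      | some b => b.1
      | none =>
        match pvPrefixByInitial.get? c with
        | some entry =>
          if PySem.Chars.startswith (c :: rest) entry.1.toList then entry.2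
          else pvDefaultCost
        | none => pvDefaultCost

-- ===== PRECONDITION & SPEC =====
def Spec_opcode_cost_py (opname : String) (out : Int) : Prop := out = opcode_cost_py_alt opname
instance (opname : String) (out : Int) : Decidable (Spec_opcode_cost_py opname out) := by unfold Spec_opcode_cost_py; infer_instance

-- ===== CLAIM =====
def Claim_equal_opcode_cost_py : Prop := ∀ (opname : String), Dom_opcode_cost_py opname → Spec_opcode_cost_py opname (opcode_cost_py opname)

-- ===== LEMMAS AND PROOFS =====

theorem pvInstrToList : "INSTRUMENTED_".toList = ['I','N','S','T','R','U','M','E','N','T','E','D','_'] := rfl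

-- the exact-table keys, in A's insertion order
def pvKeyNames : List String := [
  "CACHE",
  "POP_TOP",
  "PUSH_NULL",
  "NOP",
  "LOAD_ASSERTION_ERROR",
  "LOAD_COMMON_CONSTANT",
  "LOAD_CONST",
  "LOAD_FAST",
  "LOAD_FAST_AND_CLEAR",
  "LOAD_FAST_BORROW",
  "LOAD_FAST_BORROW_LOAD_FAST_BORROW",
  "LOAD_FAST_CHECK",
  "LOAD_FAST_LOAD_FAST",
  "LOAD_SMALL_INT",
  "RESUME",
  "RETURN_VALUE",
  "STORE_FAST",
  "STORE_FAST_LOAD_FAST",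
  "STORE_FAST_MAYBE_NULL",
  "STORE_FAST_STORE_FAST",
  "BUILD_INTERPOLATION",
  "BUILD_LIST",
  "BUILD_MAP",
  "BUILD_SET",
  "BUILD_SLICE",
  "BUILD_STRING",
  "BUILD_TEMPLATE",
  "BUILD_TUPLE",
  "CALL",
  "CALL_FUNCTION_EX",
  "CALL_INTRINSIC_1",
  "CALL_INTRINSIC_2",
  "CALL_KW",
  "COMPARE_OP",
  "FOR_ITER",
  "FORMAT_VALUE",
  "GET_ITER",
  "GET_LEN",
  "IMPORT_FROM",
  "IMPORT_NAME",
  "IMPORT_STAR",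
  "LIST_APPEND",
  "LIST_EXTEND",
  "LOAD_ATTR",
  "LOAD_BUILD_CLASS",
  "LOAD_CLOSURE",
  "LOAD_DEREF",
  "LOAD_FROM_DICT_OR_DEREF",
  "LOAD_FROM_DICT_OR_GLOBALS",
  "LOAD_GLOBAL",
  "LOAD_LOCALS",
  "LOAD_NAME",
  "LOAD_SPECIAL",
  "LOAD_SUPER_ATTR",
  "MAKE_FUNCTION",
  "MAP_ADD",
  "POP_JUMP_IF_FALSE",
  "POP_JUMP_IF_NONE",
  "POP_JUMP_IF_NOT_NONE",
  "POP_JUMP_IF_TRUE",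
  "RAISE_VARARGS",
  "SETUP_ANNOTATIONS",
  "SET_ADD"]

theorem pvKeysEq : pvExactCosts.keys = pvKeyNames := by decide

-- no exact-table key starts with INSTRUMENTED_
theorem pvExactKeys_no_instr : ∀ k ∈ pvExactCosts.keys, ¬ ("INSTRUMENTED_".toList <+: k.toList) := by decide

theorem pvExact_get_none (s : String) (h : "INSTRUMENTED_".toList <+: s.toList) :
    pvExactCosts.get? s = none := by
  rcases hg : pvExactCosts.get? s with _ | c
  · rfl
  · exfalso
    have hne : pvExactCosts.get? s ≠ none := by simp [hg]
    have hmem : s ∈ pvExactCosts.keys := by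
      by_contra hm
      exact hne ((PySem.Dict.get?_eq_none_iff_not_mem_keys _ _).mpr hm)
    exact pvExactKeys_no_instr s hmem h

theorem pvGuard_false (s : String) (h : "INSTRUMENTED_".toList <+: s.toList) :
    (decide (s = "") || PySem.Str.startswith s "<") = false := by
  rcases h with ⟨t, ht⟩
  rw [pvInstrToList] at ht
  have hne : s ≠ "" := by
    intro he; rw [he] at ht; simp at ht
  have hsw : PySem.Chars.startswith s.toList ['<'] = false := by
    rw [Bool.eq_false_iff]
    intro hc
    have hp := (PySem.Chars.startswith_iff _ _).mp hc
    rw [← ht] at hp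
    rcases hp with ⟨u, hu⟩
    simp at hu
  simp [hne, hsw]

theorem pvStartswith_instr_iff (s : String) :
    PySem.Str.startswith s "INSTRUMENTED_" = true ↔ "INSTRUMENTED_".toList <+: s.toList := by
  rw [PySem.Str.startswith_eq]; exact PySem.Chars.startswith_iff _ _

theorem pvA_step (s : String) (h : "INSTRUMENTED_".toList <+: s.toList) :
    opcode_cost_py s = opcode_cost_py (String.ofList (s.toList.drop 13)) := by
  have hfind : List.find? (fun pc : String × Option Int => PySem.Str.startswith s pc.1)
      pvPrefixCosts = some ("INSTRUMENTED_", none) := by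
    rw [pvPrefixCosts]
    exact List.find?_cons_of_pos ((pvStartswith_instr_iff s).mpr h)
  conv_lhs => rw [opcode_cost_py]
  simp only [pvGuard_false s h, pvExact_get_none s h, Bool.false_eq_true, if_false]
  split
  · rename_i pc heq
    rw [hfind] at heq
    cases heq
    rfl
  · rename_i heq
    rw [hfind] at heq
    cases heq

theorem pvStrip_step (cs : List Char) (h : "INSTRUMENTED_".toList <+: cs) :
    pvStripInstrumented cs = pvStripInstrumented (cs.drop 13) := by
  rw [pvStripInstrumented, if_pos ((PySem.Chars.startswith_iff _ _).mpr h)]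
  rfl

theorem pvStrip_id (cs : List Char) (h : ¬ "INSTRUMENTED_".toList <+: cs) :
    pvStripInstrumented cs = cs := by
  rw [pvStripInstrumented, if_neg (fun hc => h ((PySem.Chars.startswith_iff _ _).mp hc))]

theorem pvAlt_step (s : String) (h : "INSTRUMENTED_".toList <+: s.toList) :
    opcode_cost_py_alt s = opcode_cost_py_alt (String.ofList (s.toList.drop 13)) := by
  simp only [opcode_cost_py_alt, String.toList_ofList, pvStrip_step s.toList h]

-- heads differ => startswith is false
theorem pvSw_head_false (c d : Char) (t u : List Char) (h : c ≠ d) :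
    PySem.Chars.startswith (c::t) (d::u) = false := by
  rw [Bool.eq_false_iff]; intro hc
  rcases (PySem.Chars.startswith_iff _ _).mp hc with ⟨v, hv⟩
  simp at hv; exact h hv.1.symm

-- THE TABLE CORRESPONDENCE: B's cost-class search computes A's dict lookup.
theorem pvE (s : String) :
    (pvCostClasses.find? (fun b => b.2.contains s)).map Prod.fst = pvExactCosts.get? s := by
  by_cases hmem : s ∈ pvKeyNames
  · simp only [pvKeyNames, List.mem_cons, List.not_mem_nil, or_false] at hmem
    rcases hmem with rfl|rfl|rfl|rfl|rfl|rfl|rfl|rfl|rfl|rfl|rfl|rfl|rfl|rfl|rfl|rfl|rfl|rfl|rfl|rfl|rfl|rfl|rfl|rfl|rfl|rfl|rfl|rfl|rfl|rfl|rfl|rfl|rfl|rfl|rfl|rfl|rfl|rfl|rfl|rfl|rfl|rfl|rfl|rfl|rfl|rfl|rfl|rfl|rfl|rfl|rfl|rfl|rfl|rfl|rfl|rfl|rfl|rfl|rfl|rfl|rfl|rfl|rfl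
    all_goals decide
  · have hA : pvExactCosts.get? s = none :=
      (PySem.Dict.get?_eq_none_iff_not_mem_keys _ _).mpr (pvKeysEq ▸ hmem)
    have hB : pvCostClasses.find? (fun b => b.2.contains s) = none := by
      apply List.find?_eq_none.mpr
      intro b hb
      simp only [pvKeyNames, List.mem_cons, List.not_mem_nil, or_false] at hmem
      push_neg at hmem
      obtain ⟨h1, h2, h3, h4, h5, h6, h7, h8, h9, h10, h11, h12, h13, h14, h15, h16, h17, h18, h19, h20, h21, h22, h23, h24, h25, h26, h27, h28, h29, h30, h31, h32, h33, h34, h35, h36, h37, h38, h39, h40, h41, h42, h43, h44, h45, h46, h47, h48, h49, h50, h51, h52, h53, h54, h55, h56, h57, h58, h59, h60, h61, h62, h63⟩ := hmem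
      simp only [pvCostClasses, List.mem_cons, List.not_mem_nil, or_false] at hb
      rcases hb with rfl|rfl|rfl|rfl|rfl|rfl|rfl|rfl|rfl
      all_goals simp [h1, h2, h3, h4, h5, h6, h7, h8, h9, h10, h11, h12, h13, h14, h15, h16, h17, h18, h19, h20, h21, h22, h23, h24, h25, h26, h27, h28, h29, h30, h31, h32, h33, h34, h35, h36, h37, h38, h39, h40, h41, h42, h43, h44, h45, h46, h47, h48, h49, h50, h51, h52, h53, h54, h55, h56, h57, h58, h59, h60, h61, h62, h63]
    rw [hA, hB]
    rfl

-- B's body once the INSTRUMENTED_ strip is known to be the identity and the name nonempty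
def pvAltCore (c : Char) (t : List Char) : Int :=
  if c = '<' then pvDefaultCost
  else
    match pvCostClasses.find? (fun b => b.2.contains (String.ofList (c :: t))) with
    | some b => b.1
    | none =>
      match pvPrefixByInitial.get? c with
      | some entry =>
        if PySem.Chars.startswith (c :: t) entry.1.toList then entry.2
        else pvDefaultCost
      | none => pvDefaultCost

theorem pvAlt_core (s : String) (c : Char) (t : List Char)
    (h : ¬ "INSTRUMENTED_".toList <+: s.toList) (hcs : s.toList = c :: t) :
    opcode_cost_py_alt s = pvAltCore c t := by
  unfold opcode_cost_py_alt pvAltCore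
  rw [pvStrip_id s.toList h, hcs]

-- main agreement lemma for names without the INSTRUMENTED_ prefix
theorem pvNoprefix (s : String) (h : ¬ "INSTRUMENTED_".toList <+: s.toList) :
    opcode_cost_py s = opcode_cost_py_alt s := by
  have hsw : PySem.Str.startswith s "INSTRUMENTED_" = false := by
    rw [Bool.eq_false_iff]
    intro hc
    exact h ((pvStartswith_instr_iff s).mp hc)
  rcases hcs : s.toList with _ | ⟨c, t⟩
  · -- empty string
    have hse : s = "" := by
      have := congrArg String.ofList hcs
      simpa using this
    subst hse
    rw [opcode_cost_py]
    simp [opcode_cost_py_alt, pvStripInstrumented, PySem.Chars.startswith]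
  · have hofl : String.ofList (c :: t) = s := by
      rw [← hcs]; exact String.ofList_toList
    have hne : s ≠ "" := by
      intro he; rw [he] at hcs; simp at hcs
    rw [opcode_cost_py, pvAlt_core s c t h hcs]
    unfold pvAltCore
    rw [hofl]
    by_cases hlt : c = '<'
    · -- guard fires on both sides
      subst hlt
      have hg : PySem.Str.startswith s "<" = true := by
        rw [PySem.Str.startswith_eq, hcs]
        exact (PySem.Chars.startswith_iff _ _).mpr ⟨t, rfl⟩
      have hcond : (decide (s = "") || PySem.Str.startswith s "<") = true := by
        rw [hg]; simp
      rw [hcond]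
      simp
    · -- guard passes on both sides
      have hg : PySem.Str.startswith s "<" = false := by
        rw [PySem.Str.startswith_eq, hcs]
        exact pvSw_head_false c '<' t [] hlt
      have hcond : (decide (s = "") || PySem.Str.startswith s "<") = false := by
        rw [hg]; simp [hne]
      rw [hcond]
      simp only [Bool.false_eq_true, if_false, if_neg hlt]
      rcases hg2 : pvExactCosts.get? s with _ | v
      · -- exact lookup misses on both sides: prefix stage
        have hE := pvE s
        rw [hg2] at hE
        have hf : pvCostClasses.find? (fun b => b.2.contains s) = none :=
          Option.map_eq_none_iff.mp hE
        simp only [hg2, hf]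
        have hswC : PySem.Chars.startswith s.toList ['I','N','S','T','R','U','M','E','N','T','E','D','_'] = false := by
          rw [← pvInstrToList, ← PySem.Str.startswith_eq]; exact hsw
        by_cases hXB : c = 'B'
        · subst hXB
          have hBd : pvPrefixByInitial.get? 'B' = some ("BINARY_", 6) := by decide
          have hfD : PySem.Chars.startswith s.toList ['D', 'E', 'L', 'E', 'T', 'E', '_'] = false := by
            rw [hcs]; exact pvSw_head_false _ _ _ _ (by decide)
          have hfJ : PySem.Chars.startswith s.toList ['J', 'U', 'M', 'P', '_'] = false := by
            rw [hcs]; exact pvSw_head_false _ _ _ _ (by decide)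
          have hfL : PySem.Chars.startswith s.toList ['L', 'O', 'A', 'D', '_'] = false := by
            rw [hcs]; exact pvSw_head_false _ _ _ _ (by decide)
          have hfP : PySem.Chars.startswith s.toList ['P', 'O', 'P', '_', 'J', 'U', 'M', 'P'] = false := by
            rw [hcs]; exact pvSw_head_false _ _ _ _ (by decide)
          have hfS : PySem.Chars.startswith s.toList ['S', 'T', 'O', 'R', 'E', '_'] = false := by
            rw [hcs]; exact pvSw_head_false _ _ _ _ (by decide)
          have hfU : PySem.Chars.startswith s.toList ['U', 'N', 'A', 'R', 'Y', '_'] = false := by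
            rw [hcs]; exact pvSw_head_false _ _ _ _ (by decide)
          rcases hbin : PySem.Chars.startswith ('B' :: t) ['B', 'I', 'N', 'A', 'R', 'Y', '_'] with _ | _
          · have hPs : PySem.Chars.startswith s.toList ['B', 'I', 'N', 'A', 'R', 'Y', '_'] = false := by
              rw [hcs]; exact hbin
            have hAfind : pvPrefixCosts.find? (fun pc => PySem.Str.startswith s pc.1) = none := by
              rw [pvPrefixCosts]
              rw [List.find?_cons_of_neg (by simp [hswC])]
              rw [List.find?_cons_of_neg (by simp [hPs])]
              rw [List.find?_cons_of_neg (by simp [hfD])]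
              rw [List.find?_cons_of_neg (by simp [hfJ])]
              rw [List.find?_cons_of_neg (by simp [hfL])]
              rw [List.find?_cons_of_neg (by simp [hfP])]
              rw [List.find?_cons_of_neg (by simp [hfS])]
              rw [List.find?_cons_of_neg (by simp [hfU])]
              try rfl
            split
            · rename_i pc heq; rw [hAfind] at heq; cases heq
            · simp [hBd, hbin, pvDefaultCost]
          · have hPs : PySem.Chars.startswith s.toList ['B', 'I', 'N', 'A', 'R', 'Y', '_'] = true := by
              rw [hcs]; exact hbin
            have hAfind : pvPrefixCosts.find? (fun pc => PySem.Str.startswith s pc.1)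
                = some ("BINARY_", some 6) := by
              rw [pvPrefixCosts]
              rw [List.find?_cons_of_neg (by simp [hswC])]
              exact List.find?_cons_of_pos (by simp [hPs])
            split
            · rename_i pc heq; rw [hAfind] at heq; cases heq
              simp [hBd, hbin, pvDefaultCost]
            · rename_i heq; rw [hAfind] at heq; cases heq
        · by_cases hXD : c = 'D'
          · subst hXD
            have hBd : pvPrefixByInitial.get? 'D' = some ("DELETE_", 4) := by decide
            have hfB : PySem.Chars.startswith s.toList ['B', 'I', 'N', 'A', 'R', 'Y', '_'] = false := by
              rw [hcs]; exact pvSw_head_false _ _ _ _ (by decide)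
            have hfJ : PySem.Chars.startswith s.toList ['J', 'U', 'M', 'P', '_'] = false := by
              rw [hcs]; exact pvSw_head_false _ _ _ _ (by decide)
            have hfL : PySem.Chars.startswith s.toList ['L', 'O', 'A', 'D', '_'] = false := by
              rw [hcs]; exact pvSw_head_false _ _ _ _ (by decide)
            have hfP : PySem.Chars.startswith s.toList ['P', 'O', 'P', '_', 'J', 'U', 'M', 'P'] = false := by
              rw [hcs]; exact pvSw_head_false _ _ _ _ (by decide)
            have hfS : PySem.Chars.startswith s.toList ['S', 'T', 'O', 'R', 'E', '_'] = false := by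
              rw [hcs]; exact pvSw_head_false _ _ _ _ (by decide)
            have hfU : PySem.Chars.startswith s.toList ['U', 'N', 'A', 'R', 'Y', '_'] = false := by
              rw [hcs]; exact pvSw_head_false _ _ _ _ (by decide)
            rcases hbin : PySem.Chars.startswith ('D' :: t) ['D', 'E', 'L', 'E', 'T', 'E', '_'] with _ | _
            · have hPs : PySem.Chars.startswith s.toList ['D', 'E', 'L', 'E', 'T', 'E', '_'] = false := by
                rw [hcs]; exact hbin
              have hAfind : pvPrefixCosts.find? (fun pc => PySem.Str.startswith s pc.1) = none := by
                rw [pvPrefixCosts]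
                rw [List.find?_cons_of_neg (by simp [hswC])]
                rw [List.find?_cons_of_neg (by simp [hfB])]
                rw [List.find?_cons_of_neg (by simp [hPs])]
                rw [List.find?_cons_of_neg (by simp [hfJ])]
                rw [List.find?_cons_of_neg (by simp [hfL])]
                rw [List.find?_cons_of_neg (by simp [hfP])]
                rw [List.find?_cons_of_neg (by simp [hfS])]
                rw [List.find?_cons_of_neg (by simp [hfU])]
                try rfl
              split
              · rename_i pc heq; rw [hAfind] at heq; cases heq
              · simp [hBd, hbin, pvDefaultCost]
            · have hPs : PySem.Chars.startswith s.toList ['D', 'E', 'L', 'E', 'T', 'E', '_'] = true := by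
                rw [hcs]; exact hbin
              have hAfind : pvPrefixCosts.find? (fun pc => PySem.Str.startswith s pc.1)
                  = some ("DELETE_", some 4) := by
                rw [pvPrefixCosts]
                rw [List.find?_cons_of_neg (by simp [hswC])]
                rw [List.find?_cons_of_neg (by simp [hfB])]
                exact List.find?_cons_of_pos (by simp [hPs])
              split
              · rename_i pc heq; rw [hAfind] at heq; cases heq
                simp [hBd, hbin, pvDefaultCost]
              · rename_i heq; rw [hAfind] at heq; cases heq
          · by_cases hXJ : c = 'J'
            · subst hXJ
              have hBd : pvPrefixByInitial.get? 'J' = some ("JUMP_", 6) := by decide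
              have hfB : PySem.Chars.startswith s.toList ['B', 'I', 'N', 'A', 'R', 'Y', '_'] = false := by
                rw [hcs]; exact pvSw_head_false _ _ _ _ (by decide)
              have hfD : PySem.Chars.startswith s.toList ['D', 'E', 'L', 'E', 'T', 'E', '_'] = false := by
                rw [hcs]; exact pvSw_head_false _ _ _ _ (by decide)
              have hfL : PySem.Chars.startswith s.toList ['L', 'O', 'A', 'D', '_'] = false := by
                rw [hcs]; exact pvSw_head_false _ _ _ _ (by decide)
              have hfP : PySem.Chars.startswith s.toList ['P', 'O', 'P', '_', 'J', 'U', 'M', 'P'] = false := by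
                rw [hcs]; exact pvSw_head_false _ _ _ _ (by decide)
              have hfS : PySem.Chars.startswith s.toList ['S', 'T', 'O', 'R', 'E', '_'] = false := by
                rw [hcs]; exact pvSw_head_false _ _ _ _ (by decide)
              have hfU : PySem.Chars.startswith s.toList ['U', 'N', 'A', 'R', 'Y', '_'] = false := by
                rw [hcs]; exact pvSw_head_false _ _ _ _ (by decide)
              rcases hbin : PySem.Chars.startswith ('J' :: t) ['J', 'U', 'M', 'P', '_'] with _ | _
              · have hPs : PySem.Chars.startswith s.toList ['J', 'U', 'M', 'P', '_'] = false := by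
                  rw [hcs]; exact hbin
                have hAfind : pvPrefixCosts.find? (fun pc => PySem.Str.startswith s pc.1) = none := by
                  rw [pvPrefixCosts]
                  rw [List.find?_cons_of_neg (by simp [hswC])]
                  rw [List.find?_cons_of_neg (by simp [hfB])]
                  rw [List.find?_cons_of_neg (by simp [hfD])]
                  rw [List.find?_cons_of_neg (by simp [hPs])]
                  rw [List.find?_cons_of_neg (by simp [hfL])]
                  rw [List.find?_cons_of_neg (by simp [hfP])]
                  rw [List.find?_cons_of_neg (by simp [hfS])]
                  rw [List.find?_cons_of_neg (by simp [hfU])]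
                  try rfl
                split
                · rename_i pc heq; rw [hAfind] at heq; cases heq
                · simp [hBd, hbin, pvDefaultCost]
              · have hPs : PySem.Chars.startswith s.toList ['J', 'U', 'M', 'P', '_'] = true := by
                  rw [hcs]; exact hbin
                have hAfind : pvPrefixCosts.find? (fun pc => PySem.Str.startswith s pc.1)
                    = some ("JUMP_", some 6) := by
                  rw [pvPrefixCosts]
                  rw [List.find?_cons_of_neg (by simp [hswC])]
                  rw [List.find?_cons_of_neg (by simp [hfB])]
                  rw [List.find?_cons_of_neg (by simp [hfD])]
                  exact List.find?_cons_of_pos (by simp [hPs])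
                split
                · rename_i pc heq; rw [hAfind] at heq; cases heq
                  simp [hBd, hbin, pvDefaultCost]
                · rename_i heq; rw [hAfind] at heq; cases heq
            · by_cases hXL : c = 'L'
              · subst hXL
                have hBd : pvPrefixByInitial.get? 'L' = some ("LOAD_", 4) := by decide
                have hfB : PySem.Chars.startswith s.toList ['B', 'I', 'N', 'A', 'R', 'Y', '_'] = false := by
                  rw [hcs]; exact pvSw_head_false _ _ _ _ (by decide)
                have hfD : PySem.Chars.startswith s.toList ['D', 'E', 'L', 'E', 'T', 'E', '_'] = false := by
                  rw [hcs]; exact pvSw_head_false _ _ _ _ (by decide)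
                have hfJ : PySem.Chars.startswith s.toList ['J', 'U', 'M', 'P', '_'] = false := by
                  rw [hcs]; exact pvSw_head_false _ _ _ _ (by decide)
                have hfP : PySem.Chars.startswith s.toList ['P', 'O', 'P', '_', 'J', 'U', 'M', 'P'] = false := by
                  rw [hcs]; exact pvSw_head_false _ _ _ _ (by decide)
                have hfS : PySem.Chars.startswith s.toList ['S', 'T', 'O', 'R', 'E', '_'] = false := by
                  rw [hcs]; exact pvSw_head_false _ _ _ _ (by decide)
                have hfU : PySem.Chars.startswith s.toList ['U', 'N', 'A', 'R', 'Y', '_'] = false := by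
                  rw [hcs]; exact pvSw_head_false _ _ _ _ (by decide)
                rcases hbin : PySem.Chars.startswith ('L' :: t) ['L', 'O', 'A', 'D', '_'] with _ | _
                · have hPs : PySem.Chars.startswith s.toList ['L', 'O', 'A', 'D', '_'] = false := by
                    rw [hcs]; exact hbin
                  have hAfind : pvPrefixCosts.find? (fun pc => PySem.Str.startswith s pc.1) = none := by
                    rw [pvPrefixCosts]
                    rw [List.find?_cons_of_neg (by simp [hswC])]
                    rw [List.find?_cons_of_neg (by simp [hfB])]
                    rw [List.find?_cons_of_neg (by simp [hfD])]
                    rw [List.find?_cons_of_neg (by simp [hfJ])]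
                    rw [List.find?_cons_of_neg (by simp [hPs])]
                    rw [List.find?_cons_of_neg (by simp [hfP])]
                    rw [List.find?_cons_of_neg (by simp [hfS])]
                    rw [List.find?_cons_of_neg (by simp [hfU])]
                    try rfl
                  split
                  · rename_i pc heq; rw [hAfind] at heq; cases heq
                  · simp [hBd, hbin, pvDefaultCost]
                · have hPs : PySem.Chars.startswith s.toList ['L', 'O', 'A', 'D', '_'] = true := by
                    rw [hcs]; exact hbin
                  have hAfind : pvPrefixCosts.find? (fun pc => PySem.Str.startswith s pc.1)
                      = some ("LOAD_", some 4) := by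
                    rw [pvPrefixCosts]
                    rw [List.find?_cons_of_neg (by simp [hswC])]
                    rw [List.find?_cons_of_neg (by simp [hfB])]
                    rw [List.find?_cons_of_neg (by simp [hfD])]
                    rw [List.find?_cons_of_neg (by simp [hfJ])]
                    exact List.find?_cons_of_pos (by simp [hPs])
                  split
                  · rename_i pc heq; rw [hAfind] at heq; cases heq
                    simp [hBd, hbin, pvDefaultCost]
                  · rename_i heq; rw [hAfind] at heq; cases heq
              · by_cases hXP : c = 'P'
                · subst hXP
                  have hBd : pvPrefixByInitial.get? 'P' = some ("POP_JUMP", 6) := by decide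
                  have hfB : PySem.Chars.startswith s.toList ['B', 'I', 'N', 'A', 'R', 'Y', '_'] = false := by
                    rw [hcs]; exact pvSw_head_false _ _ _ _ (by decide)
                  have hfD : PySem.Chars.startswith s.toList ['D', 'E', 'L', 'E', 'T', 'E', '_'] = false := by
                    rw [hcs]; exact pvSw_head_false _ _ _ _ (by decide)
                  have hfJ : PySem.Chars.startswith s.toList ['J', 'U', 'M', 'P', '_'] = false := by
                    rw [hcs]; exact pvSw_head_false _ _ _ _ (by decide)
                  have hfL : PySem.Chars.startswith s.toList ['L', 'O', 'A', 'D', '_'] = false := by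
                    rw [hcs]; exact pvSw_head_false _ _ _ _ (by decide)
                  have hfS : PySem.Chars.startswith s.toList ['S', 'T', 'O', 'R', 'E', '_'] = false := by
                    rw [hcs]; exact pvSw_head_false _ _ _ _ (by decide)
                  have hfU : PySem.Chars.startswith s.toList ['U', 'N', 'A', 'R', 'Y', '_'] = false := by
                    rw [hcs]; exact pvSw_head_false _ _ _ _ (by decide)
                  rcases hbin : PySem.Chars.startswith ('P' :: t) ['P', 'O', 'P', '_', 'J', 'U', 'M', 'P'] with _ | _
                  · have hPs : PySem.Chars.startswith s.toList ['P', 'O', 'P', '_', 'J', 'U', 'M', 'P'] = false := by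
                      rw [hcs]; exact hbin
                    have hAfind : pvPrefixCosts.find? (fun pc => PySem.Str.startswith s pc.1) = none := by
                      rw [pvPrefixCosts]
                      rw [List.find?_cons_of_neg (by simp [hswC])]
                      rw [List.find?_cons_of_neg (by simp [hfB])]
                      rw [List.find?_cons_of_neg (by simp [hfD])]
                      rw [List.find?_cons_of_neg (by simp [hfJ])]
                      rw [List.find?_cons_of_neg (by simp [hfL])]
                      rw [List.find?_cons_of_neg (by simp [hPs])]
                      rw [List.find?_cons_of_neg (by simp [hfS])]
                      rw [List.find?_cons_of_neg (by simp [hfU])]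
                      try rfl
                    split
                    · rename_i pc heq; rw [hAfind] at heq; cases heq
                    · simp [hBd, hbin, pvDefaultCost]
                  · have hPs : PySem.Chars.startswith s.toList ['P', 'O', 'P', '_', 'J', 'U', 'M', 'P'] = true := by
                      rw [hcs]; exact hbin
                    have hAfind : pvPrefixCosts.find? (fun pc => PySem.Str.startswith s pc.1)
                        = some ("POP_JUMP", some 6) := by
                      rw [pvPrefixCosts]
                      rw [List.find?_cons_of_neg (by simp [hswC])]
                      rw [List.find?_cons_of_neg (by simp [hfB])]
                      rw [List.find?_cons_of_neg (by simp [hfD])]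
                      rw [List.find?_cons_of_neg (by simp [hfJ])]
                      rw [List.find?_cons_of_neg (by simp [hfL])]
                      exact List.find?_cons_of_pos (by simp [hPs])
                    split
                    · rename_i pc heq; rw [hAfind] at heq; cases heq
                      simp [hBd, hbin, pvDefaultCost]
                    · rename_i heq; rw [hAfind] at heq; cases heq
                · by_cases hXS : c = 'S'
                  · subst hXS
                    have hBd : pvPrefixByInitial.get? 'S' = some ("STORE_", 4) := by decide
                    have hfB : PySem.Chars.startswith s.toList ['B', 'I', 'N', 'A', 'R', 'Y', '_'] = false := by
                      rw [hcs]; exact pvSw_head_false _ _ _ _ (by decide)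
                    have hfD : PySem.Chars.startswith s.toList ['D', 'E', 'L', 'E', 'T', 'E', '_'] = false := by
                      rw [hcs]; exact pvSw_head_false _ _ _ _ (by decide)
                    have hfJ : PySem.Chars.startswith s.toList ['J', 'U', 'M', 'P', '_'] = false := by
                      rw [hcs]; exact pvSw_head_false _ _ _ _ (by decide)
                    have hfL : PySem.Chars.startswith s.toList ['L', 'O', 'A', 'D', '_'] = false := by
                      rw [hcs]; exact pvSw_head_false _ _ _ _ (by decide)
                    have hfP : PySem.Chars.startswith s.toList ['P', 'O', 'P', '_', 'J', 'U', 'M', 'P'] = false := by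
                      rw [hcs]; exact pvSw_head_false _ _ _ _ (by decide)
                    have hfU : PySem.Chars.startswith s.toList ['U', 'N', 'A', 'R', 'Y', '_'] = false := by
                      rw [hcs]; exact pvSw_head_false _ _ _ _ (by decide)
                    rcases hbin : PySem.Chars.startswith ('S' :: t) ['S', 'T', 'O', 'R', 'E', '_'] with _ | _
                    · have hPs : PySem.Chars.startswith s.toList ['S', 'T', 'O', 'R', 'E', '_'] = false := by
                        rw [hcs]; exact hbin
                      have hAfind : pvPrefixCosts.find? (fun pc => PySem.Str.startswith s pc.1) = none := by
                        rw [pvPrefixCosts]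
                        rw [List.find?_cons_of_neg (by simp [hswC])]
                        rw [List.find?_cons_of_neg (by simp [hfB])]
                        rw [List.find?_cons_of_neg (by simp [hfD])]
                        rw [List.find?_cons_of_neg (by simp [hfJ])]
                        rw [List.find?_cons_of_neg (by simp [hfL])]
                        rw [List.find?_cons_of_neg (by simp [hfP])]
                        rw [List.find?_cons_of_neg (by simp [hPs])]
                        rw [List.find?_cons_of_neg (by simp [hfU])]
                        try rfl
                      split
                      · rename_i pc heq; rw [hAfind] at heq; cases heq
                      · simp [hBd, hbin, pvDefaultCost]
                    · have hPs : PySem.Chars.startswith s.toList ['S', 'T', 'O', 'R', 'E', '_'] = true := by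
                        rw [hcs]; exact hbin
                      have hAfind : pvPrefixCosts.find? (fun pc => PySem.Str.startswith s pc.1)
                          = some ("STORE_", some 4) := by
                        rw [pvPrefixCosts]
                        rw [List.find?_cons_of_neg (by simp [hswC])]
                        rw [List.find?_cons_of_neg (by simp [hfB])]
                        rw [List.find?_cons_of_neg (by simp [hfD])]
                        rw [List.find?_cons_of_neg (by simp [hfJ])]
                        rw [List.find?_cons_of_neg (by simp [hfL])]
                        rw [List.find?_cons_of_neg (by simp [hfP])]
                        exact List.find?_cons_of_pos (by simp [hPs])
                      split
                      · rename_i pc heq; rw [hAfind] at heq; cases heq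
                        simp [hBd, hbin, pvDefaultCost]
                      · rename_i heq; rw [hAfind] at heq; cases heq
                  · by_cases hXU : c = 'U'
                    · subst hXU
                      have hBd : pvPrefixByInitial.get? 'U' = some ("UNARY_", 4) := by decide
                      have hfB : PySem.Chars.startswith s.toList ['B', 'I', 'N', 'A', 'R', 'Y', '_'] = false := by
                        rw [hcs]; exact pvSw_head_false _ _ _ _ (by decide)
                      have hfD : PySem.Chars.startswith s.toList ['D', 'E', 'L', 'E', 'T', 'E', '_'] = false := by
                        rw [hcs]; exact pvSw_head_false _ _ _ _ (by decide)
                      have hfJ : PySem.Chars.startswith s.toList ['J', 'U', 'M', 'P', '_'] = false := by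
                        rw [hcs]; exact pvSw_head_false _ _ _ _ (by decide)
                      have hfL : PySem.Chars.startswith s.toList ['L', 'O', 'A', 'D', '_'] = false := by
                        rw [hcs]; exact pvSw_head_false _ _ _ _ (by decide)
                      have hfP : PySem.Chars.startswith s.toList ['P', 'O', 'P', '_', 'J', 'U', 'M', 'P'] = false := by
                        rw [hcs]; exact pvSw_head_false _ _ _ _ (by decide)
                      have hfS : PySem.Chars.startswith s.toList ['S', 'T', 'O', 'R', 'E', '_'] = false := by
                        rw [hcs]; exact pvSw_head_false _ _ _ _ (by decide)
                      rcases hbin : PySem.Chars.startswith ('U' :: t) ['U', 'N', 'A', 'R', 'Y', '_'] with _ | _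
                      · have hPs : PySem.Chars.startswith s.toList ['U', 'N', 'A', 'R', 'Y', '_'] = false := by
                          rw [hcs]; exact hbin
                        have hAfind : pvPrefixCosts.find? (fun pc => PySem.Str.startswith s pc.1) = none := by
                          rw [pvPrefixCosts]
                          rw [List.find?_cons_of_neg (by simp [hswC])]
                          rw [List.find?_cons_of_neg (by simp [hfB])]
                          rw [List.find?_cons_of_neg (by simp [hfD])]
                          rw [List.find?_cons_of_neg (by simp [hfJ])]
                          rw [List.find?_cons_of_neg (by simp [hfL])]
                          rw [List.find?_cons_of_neg (by simp [hfP])]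
                          rw [List.find?_cons_of_neg (by simp [hfS])]
                          rw [List.find?_cons_of_neg (by simp [hPs])]
                          try rfl
                        split
                        · rename_i pc heq; rw [hAfind] at heq; cases heq
                        · simp [hBd, hbin, pvDefaultCost]
                      · have hPs : PySem.Chars.startswith s.toList ['U', 'N', 'A', 'R', 'Y', '_'] = true := by
                          rw [hcs]; exact hbin
                        have hAfind : pvPrefixCosts.find? (fun pc => PySem.Str.startswith s pc.1)
                            = some ("UNARY_", some 4) := by
                          rw [pvPrefixCosts]
                          rw [List.find?_cons_of_neg (by simp [hswC])]
                          rw [List.find?_cons_of_neg (by simp [hfB])]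
                          rw [List.find?_cons_of_neg (by simp [hfD])]
                          rw [List.find?_cons_of_neg (by simp [hfJ])]
                          rw [List.find?_cons_of_neg (by simp [hfL])]
                          rw [List.find?_cons_of_neg (by simp [hfP])]
                          rw [List.find?_cons_of_neg (by simp [hfS])]
                          exact List.find?_cons_of_pos (by simp [hPs])
                        split
                        · rename_i pc heq; rw [hAfind] at heq; cases heq
                          simp [hBd, hbin, pvDefaultCost]
                        · rename_i heq; rw [hAfind] at heq; cases heq
                    · have hfB : PySem.Chars.startswith s.toList ['B', 'I', 'N', 'A', 'R', 'Y', '_'] = false := by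
                        rw [hcs]; exact pvSw_head_false _ _ _ _ hXB
                      have hfD : PySem.Chars.startswith s.toList ['D', 'E', 'L', 'E', 'T', 'E', '_'] = false := by
                        rw [hcs]; exact pvSw_head_false _ _ _ _ hXD
                      have hfJ : PySem.Chars.startswith s.toList ['J', 'U', 'M', 'P', '_'] = false := by
                        rw [hcs]; exact pvSw_head_false _ _ _ _ hXJ
                      have hfL : PySem.Chars.startswith s.toList ['L', 'O', 'A', 'D', '_'] = false := by
                        rw [hcs]; exact pvSw_head_false _ _ _ _ hXL
                      have hfP : PySem.Chars.startswith s.toList ['P', 'O', 'P', '_', 'J', 'U', 'M', 'P'] = false := by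
                        rw [hcs]; exact pvSw_head_false _ _ _ _ hXP
                      have hfS : PySem.Chars.startswith s.toList ['S', 'T', 'O', 'R', 'E', '_'] = false := by
                        rw [hcs]; exact pvSw_head_false _ _ _ _ hXS
                      have hfU : PySem.Chars.startswith s.toList ['U', 'N', 'A', 'R', 'Y', '_'] = false := by
                        rw [hcs]; exact pvSw_head_false _ _ _ _ hXU
                      have hAfind : pvPrefixCosts.find? (fun pc => PySem.Str.startswith s pc.1) = none := by
                        rw [pvPrefixCosts]
                        rw [List.find?_cons_of_neg (by simp [hswC])]
                        rw [List.find?_cons_of_neg (by simp [hfB])]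
                        rw [List.find?_cons_of_neg (by simp [hfD])]
                        rw [List.find?_cons_of_neg (by simp [hfJ])]
                        rw [List.find?_cons_of_neg (by simp [hfL])]
                        rw [List.find?_cons_of_neg (by simp [hfP])]
                        rw [List.find?_cons_of_neg (by simp [hfS])]
                        rw [List.find?_cons_of_neg (by simp [hfU])]
                        try rfl
                      have hmk : pvPrefixByInitial = PySem.Dict.mk [('B', ("BINARY_", 6)), ('D', ("DELETE_", 4)), ('J', ("JUMP_", 6)), ('L', ("LOAD_", 4)), ('P', ("POP_JUMP", 6)), ('S', ("STORE_", 4)), ('U', ("UNARY_", 4))] := by decide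
                      have hBd : pvPrefixByInitial.get? c = none := by
                        rw [hmk]
                        simp [PySem.Dict.get?_mk_cons, PySem.Dict.get?, Ne.symm hXB, Ne.symm hXD, Ne.symm hXJ,
                          Ne.symm hXL, Ne.symm hXP, Ne.symm hXS, Ne.symm hXU]
                      split
                      · rename_i pc heq; rw [hAfind] at heq; cases heq
                      · simp [hBd]
      · -- exact lookup hits on both sides
        have hE := pvE s
        rw [hg2] at hE
        rcases Option.map_eq_some_iff.mp hE with ⟨b, hx, hfb⟩
        simp only [hg2, hx]
        exact hfb.symm

theorem pvMain_aux : ∀ (n : Nat) (s : String), s.toList.length ≤ n →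
    opcode_cost_py s = opcode_cost_py_alt s := by
  intro n
  induction n with
  | zero =>
    intro s hs
    apply pvNoprefix
    intro hp
    have hl := hp.length_le
    rw [pvInstrToList] at hl
    simp only [List.length_cons, List.length_nil] at hl
    omega
  | succ n ih =>
    intro s hs
    by_cases hp : "INSTRUMENTED_".toList <+: s.toList
    · have hl := hp.length_le
      rw [pvInstrToList] at hl
      simp only [List.length_cons, List.length_nil] at hl
      rw [pvA_step s hp, pvAlt_step s hp]
      apply ih
      simp only [String.toList_ofList, List.length_drop]
      omega
    · exact pvNoprefix s hp

theorem opcode_cost_main (opname : String) :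
    opcode_cost_py opname = opcode_cost_py_alt opname :=
  pvMain_aux opname.toList.length opname le_rfl

-- ===== VERDICT =====
theorem opcode_cost_py_spec : Claim_equal_opcode_cost_py := by
  intro opname _
  unfold Spec_opcode_cost_py
  exact opcode_cost_main opname
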